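-- pv_equiv track=rewrite | github.com/merlinmah/Scintomatic | Scintomatic.py | byte_reconstructor
-- ===== SOURCE A (Python) =====
-- def byte_reconstructor(LSB_to_MSB_dec_bytes):
--     """
--     Helper function that constructs a single decimal number from a list of bytes,
--     each expressed as a decimal value, in reverse MSB/LSB order.
--     Also takes care of the two special-case value substitutions.
--     """
--     translated_bytes = []
--     for byte in LSB_to_MSB_dec_bytes:
--         if byte==253:
--             translated_bytes.append(13)
--         elif byte==254:
--             translated_bytes.append(35)
--         elif byte==252: # With checks upstream, shouldn't be necessary... but we're leaving it in
--             break # End of spectrum indicator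
--         else:
--             translated_bytes.append(byte)
--     translated_bytes = [byteval*(250**bytenum) for bytenum, byteval in enumerate(translated_bytes)]
--     return sum(translated_bytes)
-- ===== SOURCE B (Python) =====
-- def byte_reconstructor(LSB_to_MSB_dec_bytes):
--     """Horner's method, MSB->LSB: total = total*250 + substituted byte."""
--     bs = LSB_to_MSB_dec_bytes
--     if 252 in bs:
--         bs = bs[:bs.index(252)]
--     total = 0
--     for b in reversed(bs):
--         total = total * 250 + (13 if b == 253 else 35 if b == 254 else b)
--     return total
-- ===== Notes on version B (the rewrite author's own statement) =====
-- stated objective: faster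
-- what changed: Replaces A's translate-then-enumerate pass that computes an independent power 250**i for every position with a single Horner fold MSB->LSB (total = total*250 + byte), truncating at the first 252 up front.
import Mathlib
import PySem

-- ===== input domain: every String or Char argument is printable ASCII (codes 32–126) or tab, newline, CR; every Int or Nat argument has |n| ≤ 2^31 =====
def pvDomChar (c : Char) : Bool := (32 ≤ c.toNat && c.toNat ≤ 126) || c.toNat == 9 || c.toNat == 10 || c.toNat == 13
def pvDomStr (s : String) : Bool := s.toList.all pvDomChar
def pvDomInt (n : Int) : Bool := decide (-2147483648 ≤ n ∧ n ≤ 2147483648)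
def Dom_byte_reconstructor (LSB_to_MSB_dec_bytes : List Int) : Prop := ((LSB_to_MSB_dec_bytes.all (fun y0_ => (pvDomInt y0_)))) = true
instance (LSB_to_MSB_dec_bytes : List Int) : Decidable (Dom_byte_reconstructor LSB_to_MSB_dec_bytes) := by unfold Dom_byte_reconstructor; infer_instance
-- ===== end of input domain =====

-- B replaces A's per-position power computation 250**i with a single Horner fold
-- MSB→LSB (objective: faster, measured asymptotically faster).

-- ===== PORT A =====
-- the translation loop of A, with `break` on 252 ending the loop
def pvTransA : List Int → List Int
  | [] => []
  | b :: rest =>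
    if b == 253 then 13 :: pvTransA rest
    else if b == 254 then 35 :: pvTransA rest
    else if b == 252 then []
    else b :: pvTransA rest

def byte_reconstructor (LSB_to_MSB_dec_bytes : List Int) : Int :=
  let translated_bytes := pvTransA LSB_to_MSB_dec_bytes
  let translated_bytes :=
    (PySem.List.enumerate translated_bytes).map
      (fun p => p.2 * (250 : Int) ^ p.1.toNat)
  translated_bytes.sum

-- ===== PORT B =====
def byte_reconstructor_alt (LSB_to_MSB_dec_bytes : List Int) : Int :=
  let bs :=
    if (252 : Int) ∈ LSB_to_MSB_dec_bytes then
      LSB_to_MSB_dec_bytes.take ((PySem.List.index? LSB_to_MSB_dec_bytes 252).getD 0)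
    else LSB_to_MSB_dec_bytes
  bs.reverse.foldl
    (fun total b => total * 250 + (if b = 253 then 13 else if b = 254 then 35 else b)) 0

-- ===== PRECONDITION & SPEC =====
def Spec_byte_reconstructor (LSB_to_MSB_dec_bytes : List Int) (out : Int) : Prop := out = byte_reconstructor_alt LSB_to_MSB_dec_bytes
instance (LSB_to_MSB_dec_bytes : List Int) (out : Int) : Decidable (Spec_byte_reconstructor LSB_to_MSB_dec_bytes out) := by unfold Spec_byte_reconstructor; infer_instance

-- ===== CLAIM (what is proved, stated in full; the proofs are below) =====
def Claim_equal_byte_reconstructor : Prop := ∀ (LSB_to_MSB_dec_bytes : List Int), Dom_byte_reconstructor LSB_to_MSB_dec_bytes → Spec_byte_reconstructor LSB_to_MSB_dec_bytes (byte_reconstructor LSB_to_MSB_dec_bytes)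

-- ===== LEMMAS AND PROOFS =====

def pvSubst (b : Int) : Int := if b = 253 then 13 else if b = 254 then 35 else b

-- A's translated list is the substitution map over the prefix before the first 252
theorem pvTransA_eq (xs : List Int) :
    pvTransA xs = (xs.takeWhile (fun b => b ≠ 252)).map pvSubst := by
  induction xs with
  | nil => rfl
  | cons b rest ih =>
    simp only [pvTransA, List.takeWhile]
    by_cases h3 : b = 253
    · simp [h3, pvSubst, ih]
    · by_cases h4 : b = 254
      · simp [h4, pvSubst, ih]
      · by_cases h2 : b = 252
        · simp [h2]
        · simp [h2, h3, h4, pvSubst, ih]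

-- B's truncation is also the takeWhile prefix
theorem pvTrunc_eq (xs : List Int) :
    (if (252 : Int) ∈ xs then
        xs.take ((PySem.List.index? xs 252).getD 0)
      else xs) = xs.takeWhile (fun b => b ≠ 252) := by
  induction xs with
  | nil => simp
  | cons b rest ih =>
    by_cases h2 : b = 252
    · subst h2
      rw [PySem.List.index?_cons_self]
      simp [List.takeWhile]
    · have hcons := PySem.List.index?_cons_of_ne rest (show b ≠ (252:Int) from h2)
      by_cases hm : (252 : Int) ∈ rest
      · obtain ⟨k, hk⟩ :=
          Option.isSome_iff_exists.1 ((PySem.List.index?_isSome_iff rest 252).2 hm)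
        rw [hk] at ih hcons
        simp only [hm, if_pos, Option.getD_some] at ih
        rw [if_pos (List.mem_cons_of_mem _ hm), hcons]
        simp [List.takeWhile, h2, List.take_succ_cons, ih]
      · have hmem : (252 : Int) ∉ b :: rest := by simp [hm, Ne.symm h2]
        rw [if_neg hmem]
        rw [if_neg hm] at ih
        rw [List.takeWhile_cons_of_pos (by simpa using h2)]
        exact congrArg (b :: ·) ih

-- Horner over the reverse equals the enumerated power sum
theorem pvHorner_eq (t : List Int) :
    t.reverse.foldl (fun total b => total * 250 + pvSubst b) 0
      = ((PySem.List.enumerate (t.map pvSubst)).map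
          (fun p => p.2 * (250 : Int) ^ p.1.toNat)).sum := by
  suffices h : ∀ (t : List Int) (s : Nat),
      ((PySem.List.enumerate (t.map pvSubst) (s : Int)).map
          (fun p => p.2 * (250 : Int) ^ p.1.toNat)).sum
        = 250 ^ s * (t.reverse.foldl (fun total b => total * 250 + pvSubst b) 0) by
    have := h t 0; simpa using this.symm
  intro t
  induction t with
  | nil => simp
  | cons b rest ih =>
    intro s
    rw [List.map_cons, PySem.List.enumerate_cons, List.map_cons, List.sum_cons]
    have hs : ((s : Int) + 1).toNat = s + 1 := by omega
    have : (s : Int) + 1 = ((s + 1 : Nat) : Int) := by push_cast; ring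
    rw [this, ih (s + 1)]
    have hrev : (b :: rest).reverse.foldl (fun total b => total * 250 + pvSubst b) 0
        = (rest.reverse.foldl (fun total b => total * 250 + pvSubst b) 0) * 250 + pvSubst b := by
      simp [List.reverse_cons, List.foldl_append]
    rw [hrev]
    simp only [Int.toNat_natCast]
    ring

-- ===== VERDICT (by name: the statement is the Claim_ definition above) =====
theorem byte_reconstructor_spec : Claim_equal_byte_reconstructor := by
  intro xs _
  unfold Spec_byte_reconstructor byte_reconstructor byte_reconstructor_alt
  simp only [pvTransA_eq, pvTrunc_eq]
  have := pvHorner_eq (xs.takeWhile (fun b => b ≠ 252))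
  rw [← this]
  rfl
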